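-- pv_equiv track=rewrite | github.com/HadiNamazi/EVENT-qt | pyui/common_functions.py | date_validator
-- ===== SOURCE A (Python) =====
-- def date_validator(date):
--     splitted_date_str = date.split('/')
--     splitted_date = [int(i) for i in splitted_date_str]
--
--     if splitted_date[0] > 1400 and splitted_date[1] >= 1 and splitted_date[1] <= 12 and splitted_date[2] >= 1:
--         if splitted_date[1] <= 6:  # 31day
--             if splitted_date[2] <= 31:
--                 return True
--         elif splitted_date[1] >= 7 and splitted_date[1] <= 11:  # 30day
--             if splitted_date[2] <= 30:
--                 return True
--         else:  # 29day
--             if splitted_date[2] <= 29: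
--                 return True
--     return False
-- ===== SOURCE B (Python) =====
-- def date_validator(date):
--     nums = [int(p) for p in date.split('/')]
--     # days in the Persian year strictly before month m (cumulative-sum closed form)
--     before = lambda m: 31 * (m - 1) - max(m - 7, 0)
--     # a date is valid iff its day-of-year ordinal lands inside its own month's
--     # slice of the 365-day year
--     return (nums[0] > 1400 and 1 <= nums[1] <= 12 and 1 <= nums[2]
--             and before(nums[1]) + nums[2] <= min(before(nums[1] + 1), 365))
-- ===== Notes on version B (the rewrite author's own statement) =====
-- stated objective: alternative
-- what changed: Replaces A's per-month branching with day-of-year ordinal arithmetic: B computes the cumulative days before the month by a closed form 31*(m-1)-max(m-7,0) and accepts iff the ordinal before(m)+day stays within min(before(m+1),365), so no month-length table or if/elif chain exists in B.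
import Mathlib
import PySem

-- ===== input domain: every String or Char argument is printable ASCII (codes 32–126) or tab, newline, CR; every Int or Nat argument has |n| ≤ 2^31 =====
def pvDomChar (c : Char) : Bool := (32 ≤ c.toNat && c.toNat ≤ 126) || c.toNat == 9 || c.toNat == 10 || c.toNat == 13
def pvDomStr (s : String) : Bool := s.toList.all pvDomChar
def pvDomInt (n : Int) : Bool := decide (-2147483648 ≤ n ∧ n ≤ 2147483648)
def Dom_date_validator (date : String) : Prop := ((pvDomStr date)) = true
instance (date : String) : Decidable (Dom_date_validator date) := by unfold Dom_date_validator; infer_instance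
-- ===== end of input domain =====

-- B validates via day-of-year ordinal arithmetic (a cumulative-days closed form) instead of A's per-month branching.

-- ===== PORT A =====
-- int(i) for every piece (ValueError → none) and the indexings [0],[1],[2] (IndexError → none);
-- Pre_ excludes exactly the none cases, so the `false` arms are unreachable under Pre_.
def date_validator (date : String) : Bool :=
  match (((PySem.Str.split? date "/").getD []) |>.mapM PySem.Int.ofStr?) with
  | none => false
  | some splitted_date =>
    match PySem.List.pyGet? splitted_date 0, PySem.List.pyGet? splitted_date 1,
          PySem.List.pyGet? splitted_date 2 with
    | some y, some m, some d =>
      if y > 1400 ∧ 1 ≤ m ∧ m ≤ 12 ∧ 1 ≤ d then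
        if m ≤ 6 then (if d ≤ 31 then true else false)
        else if 7 ≤ m ∧ m ≤ 11 then (if d ≤ 30 then true else false)
        else (if d ≤ 29 then true else false)
      else false
    | _, _, _ => false

-- ===== PORT B =====
-- days of the Persian year strictly before month m (Source B's `before` lambda)
def pvBefore (m : Int) : Int := 31 * (m - 1) - max (m - 7) 0

-- nums[0], nums[1], nums[2] via pyGet?, plumbed with Option combinators;
-- the `false`/`getD false` arms are the raising cases, excluded by Pre_.
def date_validator_alt (date : String) : Bool :=
  ((((PySem.Str.split? date "/").getD []) |>.mapM PySem.Int.ofStr?).elim false fun nums =>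
    ((PySem.List.pyGet? nums 0).bind fun year =>
      (PySem.List.pyGet? nums 1).bind fun month =>
        (PySem.List.pyGet? nums 2).map fun day =>
          decide (year > 1400) && decide (1 ≤ month) && decide (month ≤ 12) && decide (1 ≤ day) &&
            decide (pvBefore month + day ≤ min (pvBefore (month + 1)) 365)).getD false)

-- ===== PRECONDITION & SPEC =====
-- Exactly the inputs where A returns: every piece of the slash-split parses as an int (else ValueError), and
-- either there are at least three pieces, or Python's short-circuiting `and` stops before the
-- missing index (year ≤ 1400 stops before [1]; a month outside 1..12 stops before [2]).
def Pre_date_validator (date : String) : Prop :=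
  (((PySem.Str.split? date "/").getD []).all fun p => (PySem.Int.ofStr? p).isSome) = true ∧
  (3 ≤ ((PySem.Str.split? date "/").getD []).length ∨
   (PySem.Int.ofStr? (((PySem.Str.split? date "/").getD []).getD 0 "")).getD 0 ≤ 1400 ∨
   (2 ≤ ((PySem.Str.split? date "/").getD []).length ∧
    ((PySem.Int.ofStr? (((PySem.Str.split? date "/").getD []).getD 1 "")).getD 0 < 1 ∨
     12 < (PySem.Int.ofStr? (((PySem.Str.split? date "/").getD []).getD 1 "")).getD 0)))
instance (date : String) : Decidable (Pre_date_validator date) := by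
  unfold Pre_date_validator; infer_instance

def pvWitness_date_validator : String := "1402/7/30"

def Spec_date_validator (date : String) (out : Bool) : Prop := out = date_validator_alt date
instance (date : String) (out : Bool) : Decidable (Spec_date_validator date out) := by
  unfold Spec_date_validator; infer_instance

-- ===== CLAIM (what is proved, stated in full; the proofs are below) =====
def Claim_equal_date_validator : Prop := ∀ (date : String), Dom_date_validator date → Pre_date_validator date → Spec_date_validator date (date_validator date)

-- ===== LEMMAS AND PROOFS =====
-- the per-triple bodies agree
theorem pv_body_eq (y m d : Int) :
    (if y > 1400 ∧ 1 ≤ m ∧ m ≤ 12 ∧ 1 ≤ d then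
        if m ≤ 6 then (if d ≤ 31 then true else false)
        else if 7 ≤ m ∧ m ≤ 11 then (if d ≤ 30 then true else false)
        else (if d ≤ 29 then true else false)
      else false)
    = (decide (y > 1400) && decide (1 ≤ m) && decide (m ≤ 12) && decide (1 ≤ d) &&
        decide (pvBefore m + d ≤ min (pvBefore (m + 1)) 365)) := by
  by_cases hm : 1 ≤ m ∧ m ≤ 12
  · obtain ⟨h1, h2⟩ := hm
    interval_cases m <;> split_ifs <;> simp_all [pvBefore] <;> omega
  · have hA : ¬ (y > 1400 ∧ 1 ≤ m ∧ m ≤ 12 ∧ 1 ≤ d) := by tauto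
    rw [if_neg hA]
    rcases not_and_or.mp hm with h | h
    · simp [h]
    · simp [h]

-- ===== VERDICT (by name: the statement is the Claim_ definition above) =====
theorem date_validator_spec : Claim_equal_date_validator := by
  intro date _ _
  unfold Spec_date_validator date_validator date_validator_alt
  cases (((PySem.Str.split? date "/").getD []) |>.mapM PySem.Int.ofStr?) with
  | none => rfl
  | some nums =>
    cases h0 : PySem.List.pyGet? nums 0 <;>
      cases h1 : PySem.List.pyGet? nums 1 <;>
        cases h2 : PySem.List.pyGet? nums 2 <;>
          simp only [h0, h1, h2, Option.elim, Option.bind, Option.map, Option.getD] <;>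
            first
              | rfl
              | exact pv_body_eq ..
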